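-- pv_equiv track=rewrite | github.com/zhenkas/smhasher | PythonApplication1/PythonApplication1.py | has_unique_hex_digits
-- ===== SOURCE A (Python) =====
-- def has_unique_hex_digits(num):
--     # Check if the number has unique HEX digits
--     seen_digits = set()
--     while num > 0:
--         digit = num & 0xF + (1 << 4)   # Extract the last 4 bits (digit)
--         if digit in seen_digits:
--             return False
--         seen_digits.add(digit)
--         num >>= 5  # Shift right by 4 bits
--     return True
-- ===== SOURCE B (Python) =====
-- def has_unique_hex_digits(num):
--     # Sort-then-scan: collect the extracted chunks, sort them, and check that no
--     # two adjacent sorted chunks are equal (duplicates become adjacent).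
--     chunks = []
--     while num > 0:
--         chunks.append(num & 0xF + (1 << 4))
--         num >>= 5
--     chunks.sort()
--     return all(a != b for a, b in zip(chunks, chunks[1:]))
-- ===== Notes on version B (the rewrite author's own statement) =====
-- stated objective: alternative
-- what changed: Replaces A's incremental hash-set membership test with early return by the classic sort-then-scan duplicate detection: collect all chunks, sort them, and check adjacent pairs for equality.
import Mathlib
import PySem

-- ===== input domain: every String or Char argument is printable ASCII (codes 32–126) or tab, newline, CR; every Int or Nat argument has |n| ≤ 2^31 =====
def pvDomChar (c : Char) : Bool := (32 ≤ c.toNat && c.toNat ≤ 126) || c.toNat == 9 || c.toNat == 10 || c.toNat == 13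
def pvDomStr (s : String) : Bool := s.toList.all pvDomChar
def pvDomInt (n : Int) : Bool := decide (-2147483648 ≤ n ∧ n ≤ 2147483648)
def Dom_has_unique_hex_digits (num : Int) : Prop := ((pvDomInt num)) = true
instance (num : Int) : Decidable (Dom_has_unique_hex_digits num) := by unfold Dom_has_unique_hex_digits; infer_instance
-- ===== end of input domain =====

-- B detects duplicates by the classic sort-then-adjacent-scan algorithm instead of A's
-- incremental seen-set membership test with early return (objective: alternative algorithm).


-- ===== PORT A =====
-- the while loop of A: seen-set of chunks, early return False on a repeat
def pvLoopA (num : Int) (seen : PySem.Set Int) : Bool :=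
  if h : num > 0 then
    let digit := PySem.Int.band num ((0xF + (1 <<< 4) : Nat) : Int)
    if PySem.Set.contains seen digit then false
    else pvLoopA (num >>> (5:Nat)) (PySem.Set.add seen digit)
  else true
  termination_by num.toNat
  decreasing_by rw [Int.shiftRight_eq_div_pow]; omega

def has_unique_hex_digits (num : Int) : Bool := pvLoopA num PySem.Set.empty

-- ===== PORT B =====
-- the while loop of B: collect every chunk into a list
def pvChunksB (num : Int) : List Int :=
  if h : num > 0 then (PySem.Int.band num ((0xF + (1 <<< 4) : Nat) : Int)) :: pvChunksB (num >>> (5:Nat))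
  else []
  termination_by num.toNat
  decreasing_by rw [Int.shiftRight_eq_div_pow]; omega

def has_unique_hex_digits_alt (num : Int) : Bool :=
  let s := PySem.List.sorted (pvChunksB num) (fun x => x) false
  (s.zip (s.drop 1)).all (fun p => p.1 != p.2)

-- ===== PRECONDITION & SPEC =====
def Spec_has_unique_hex_digits (num : Int) (out : Bool) : Prop := out = has_unique_hex_digits_alt num
instance (num : Int) (out : Bool) : Decidable (Spec_has_unique_hex_digits num out) := by unfold Spec_has_unique_hex_digits; infer_instance

-- ===== CLAIM (what is proved, stated in full; the proofs are below) =====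
def Claim_equal_has_unique_hex_digits : Prop := ∀ (num : Int), Dom_has_unique_hex_digits num → Spec_has_unique_hex_digits num (has_unique_hex_digits num)

-- ===== LEMMAS AND PROOFS =====

-- A's loop returns true iff the remaining chunks are pairwise distinct and disjoint from `seen`.
theorem pvLoopA_eq_true (num : Int) (seen : PySem.Set Int) :
    pvLoopA num seen = true ↔ (pvChunksB num).Nodup ∧ ∀ c ∈ pvChunksB num, c ∉ seen := by
  fun_induction pvLoopA num seen with
  | case1 num seen h digit hc =>
      rw [pvChunksB]
      simp only [h, dif_pos]
      simp only [PySem.Set.contains, List.contains_eq_mem, decide_eq_true_eq] at hc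
      simp only [Bool.false_eq_true, false_iff, not_and]
      rintro - hdis
      exact hdis _ List.mem_cons_self hc
  | case2 num seen h digit hc ih =>
      rw [pvChunksB]
      simp only [h, dif_pos]
      simp [PySem.Set.contains] at hc
      rw [ih]
      simp only [List.nodup_cons, List.mem_cons]
      constructor
      · rintro ⟨hnd, hdis⟩
        refine ⟨⟨fun hm => ?_, hnd⟩, ?_⟩
        · exact (hdis _ hm) ((PySem.Set.mem_add seen digit digit).mpr (Or.inr rfl))
        · rintro c (rfl | hm)
          · exact hc
          · intro hs
            exact hdis c hm ((PySem.Set.mem_add seen digit c).mpr (Or.inl hs))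
      · rintro ⟨⟨hnm, hnd⟩, hdis⟩
        refine ⟨hnd, fun c hm hs => ?_⟩
        rcases (PySem.Set.mem_add seen digit c).mp hs with hs | rfl
        · exact hdis c (Or.inr hm) hs
        · exact hnm hm
  | case3 num seen h =>
      rw [pvChunksB]
      simp [h]

-- the zip-with-tail all-distinct scan is exactly Chain' (· ≠ ·)
theorem pv_zip_all_ne (l : List Int) :
    ((l.zip (l.drop 1)).all (fun p => p.1 != p.2)) = true ↔ l.IsChain (· ≠ ·) := by
  induction l with
  | nil => simp
  | cons a t ih =>
      cases t with
      | nil => simp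
      | cons b t' => simp_all [List.isChain_cons_cons]

-- on a ≤-sorted list, no two adjacent elements equal ↔ no duplicates at all
theorem pv_chain_ne_iff_nodup (l : List Int) (h : l.Pairwise (· ≤ ·)) :
    l.IsChain (· ≠ ·) ↔ l.Nodup := by
  constructor
  · intro hc
    have hle : l.IsChain (· ≤ ·) := h.isChain
    have hlt : l.IsChain (· < ·) := by
      rw [List.isChain_iff_getElem] at hc hle ⊢
      exact fun i hi => lt_of_le_of_ne (hle i hi) (hc i hi)
    exact (List.isChain_iff_pairwise.mp hlt).imp ne_of_lt
  · intro hn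
    exact List.Pairwise.isChain hn

-- ===== VERDICT (by name: the statement is the Claim_ definition above) =====
theorem has_unique_hex_digits_spec : Claim_equal_has_unique_hex_digits := by
  intro num _
  unfold Spec_has_unique_hex_digits has_unique_hex_digits has_unique_hex_digits_alt
  rw [Bool.eq_iff_iff, pvLoopA_eq_true, pv_zip_all_ne,
    pv_chain_ne_iff_nodup _ (PySem.List.sorted_pairwise (pvChunksB num) (fun x => x)),
    (PySem.List.sorted_perm (pvChunksB num) (fun x => x) false).nodup_iff]
  simp [PySem.Set.empty]
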